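-- pv_equiv track=rewrite | github.com/yaatehr/iterative-ldp | colab--vscode.py | metric_to_unit_mapping
-- ===== SOURCE A (Python) =====
-- def metric_to_unit_mapping(word):
--   # import re
--   normalized_rmse_metric_list = ['partition_weighted_rmse', 'weighted_rmse', 'inv_weighted_rmse', 'prob_est', 'partition_inv_weighted_rmse']
--
--   def comp_word(w, t):
--     return w == t or w == "baseline_" + t
--   if comp_word(word, "prob_est"):
--     return "Frequency Estimation Density"
--   if comp_word(word, "kl_divergence"):
--     return "Relative Entropy"
--   if any([comp_word(word, w) for w in normalized_rmse_metric_list]):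
--     return "Distribution RMSE"
--   if comp_word(word, "variance"):
--     return "Emp. Error Variance"
--   if comp_word(word, 'hr_error'):
--     return "Distribution RMSE"
--   if comp_word(word, 'hr_count_error_rmse'):
--     return "Count RMSE (Normalized)"
--   # if comp_word(word, "chi_square_distance"
--   if comp_word(word, 'time'):
--     return 'Duration (seconds)'
--   return ''.join((x.capitalize() + " " or ' ') if x !="inv" else (x.capitalize() + ". " or ' ') for x in word.split('_'))
-- ===== SOURCE B (Python) =====
-- _LABELS = {
--     'prob_est': 'Frequency Estimation Density',
--     'kl_divergence': 'Relative Entropy',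
--     'partition_weighted_rmse': 'Distribution RMSE',
--     'weighted_rmse': 'Distribution RMSE',
--     'inv_weighted_rmse': 'Distribution RMSE',
--     'partition_inv_weighted_rmse': 'Distribution RMSE',
--     'hr_error': 'Distribution RMSE',
--     'variance': 'Emp. Error Variance',
--     'hr_count_error_rmse': 'Count RMSE (Normalized)',
--     'time': 'Duration (seconds)',
-- }
--
--
-- def metric_to_unit_mapping(word):
--   key = word[len('baseline_'):] if word.startswith('baseline_') else word
--   if key in _LABELS:
--     return _LABELS[key]
--   # streaming fallback: one pass over the characters with a token accumulator,
--   # no split/map/join; a trailing underscore sentinel flushes the last token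
--   out = []
--   token = []
--   for c in word + '_':
--     if c == '_':
--       t = (token[0].upper() + ''.join(token[1:]).lower()) if token else ''
--       out.append(t + ('. ' if ''.join(token) == 'inv' else ' '))
--       token = []
--     else:
--       token.append(c)
--   return ''.join(out)
-- ===== Notes on version B (the rewrite author's own statement) =====
-- stated objective: alternative
-- what changed: B replaces A's sequential chain of comp_word equality tests (bare and baseline-prefixed form each, plus an any() scan) with one prefix-strip and a label-table lookup, and replaces A's split-on-underscore/capitalize/join generator fallback with a single character-level streaming pass: an explicit loop with a token accumulator that flushes a capitalized token (with the 'inv' dot) at each underscore and at a trailing sentinel.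
import Mathlib
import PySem

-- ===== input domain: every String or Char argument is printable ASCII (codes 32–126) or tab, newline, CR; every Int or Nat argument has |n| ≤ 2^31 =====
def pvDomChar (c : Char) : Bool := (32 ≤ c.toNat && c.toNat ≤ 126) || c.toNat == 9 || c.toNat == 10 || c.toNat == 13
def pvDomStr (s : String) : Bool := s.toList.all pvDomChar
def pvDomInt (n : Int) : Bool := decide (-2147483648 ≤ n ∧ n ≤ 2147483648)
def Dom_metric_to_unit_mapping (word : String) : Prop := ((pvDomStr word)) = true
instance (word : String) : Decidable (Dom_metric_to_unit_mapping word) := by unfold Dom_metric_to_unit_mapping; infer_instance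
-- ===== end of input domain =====

-- B replaces A's chain of comp_word tests with a stripped-key table lookup and A's
-- split/capitalize/join fallback with a single character-level streaming pass (objective: alternative).


-- ===== PORT A =====
-- x.capitalize(): first char uppercased, the rest lowercased (exact on the ASCII domain)
def mtum_capitalize (x : List Char) : List Char :=
  match x with
  | [] => []
  | c :: rest => PySem.Chars.upperChar c :: rest.map PySem.Chars.lowerChar

-- A's final return:
-- ''.join((x.capitalize() + " " or ' ') if x != "inv" else (x.capitalize() + ". " or ' ') for x in word.split('_'))
-- ('… + " "' is always truthy, so the 'or' branches never fire)
def mtum_fallback (word : String) : String :=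
  String.ofList (PySem.Chars.join [] ((PySem.Chars.splitOn word.toList "_".toList).map (fun x =>
    if x != "inv".toList then mtum_capitalize x ++ " ".toList else mtum_capitalize x ++ ". ".toList)))

-- comp_word(w, t): w == t or w == "baseline_" + t
def mtum_compWord (w t : List Char) : Bool := w == t || w == "baseline_".toList ++ t

def metric_to_unit_mapping (word : String) : String :=
  let normalized_rmse_metric_list := ["partition_weighted_rmse".toList, "weighted_rmse".toList,
    "inv_weighted_rmse".toList, "prob_est".toList, "partition_inv_weighted_rmse".toList]
  let w := word.toList
  if mtum_compWord w "prob_est".toList then "Frequency Estimation Density"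
  else if mtum_compWord w "kl_divergence".toList then "Relative Entropy"
  else if (normalized_rmse_metric_list.map (fun t => mtum_compWord w t)).any id then "Distribution RMSE"
  else if mtum_compWord w "variance".toList then "Emp. Error Variance"
  else if mtum_compWord w "hr_error".toList then "Distribution RMSE"
  else if mtum_compWord w "hr_count_error_rmse".toList then "Count RMSE (Normalized)"
  else if mtum_compWord w "time".toList then "Duration (seconds)"
  else mtum_fallback word

-- ===== PORT B =====
-- the module-level dict literal _LABELS of Source B (keys as char lists)
def mtum_labels : PySem.Dict (List Char) String := PySem.Dict.ofList
  [("prob_est".toList, "Frequency Estimation Density"),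
   ("kl_divergence".toList, "Relative Entropy"),
   ("partition_weighted_rmse".toList, "Distribution RMSE"),
   ("weighted_rmse".toList, "Distribution RMSE"),
   ("inv_weighted_rmse".toList, "Distribution RMSE"),
   ("partition_inv_weighted_rmse".toList, "Distribution RMSE"),
   ("hr_error".toList, "Distribution RMSE"),
   ("variance".toList, "Emp. Error Variance"),
   ("hr_count_error_rmse".toList, "Count RMSE (Normalized)"),
   ("time".toList, "Duration (seconds)")]

-- flushing one token: (token[0].upper() + ''.join(token[1:]).lower() if token else '')
--                     + ('. ' if ''.join(token) == 'inv' else ' ')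
def mtumB_flush (token : List Char) : List Char :=
  (match token with
   | [] => []
   | c :: rest => PySem.Chars.upperChar c :: PySem.Chars.lower rest)
  ++ (if token == "inv".toList then ". ".toList else " ".toList)

-- the for-loop of Source B over word plus a sentinel underscore: state = pending token (out is emitted left to right)
def mtumB_loop : List Char → List Char → List Char
  | [], _token => []
  | c :: cs, token =>
    if c == '_' then mtumB_flush token ++ mtumB_loop cs []
    else mtumB_loop cs (token ++ [c])

def mtumB_fallback (word : String) : String :=
  String.ofList (mtumB_loop (word.toList ++ ['_']) [])

def metric_to_unit_mapping_alt (word : String) : String :=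
  let w := word.toList
  let key := if PySem.Chars.startswith w "baseline_".toList then PySem.Chars.slice w (some 9) none else w
  match PySem.Dict.get? mtum_labels key with
  | some label => label
  | none => mtumB_fallback word

-- ===== PRECONDITION & SPEC =====
def Spec_metric_to_unit_mapping (word : String) (out : String) : Prop := out = metric_to_unit_mapping_alt word
instance (word : String) (out : String) : Decidable (Spec_metric_to_unit_mapping word out) := by unfold Spec_metric_to_unit_mapping; infer_instance

-- ===== CLAIM (what is proved, stated in full; the proofs are below) =====
def Claim_equal_metric_to_unit_mapping : Prop := ∀ (word : String), Dom_metric_to_unit_mapping word → Spec_metric_to_unit_mapping word (metric_to_unit_mapping word)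

-- ===== LEMMAS AND PROOFS =====

-- proof-side recursive specification of split-on-underscore (cur holds the current token reversed)
def mtumSplit : List Char → List Char → List (List Char)
  | [], cur => [cur.reverse]
  | c :: rest, cur => if c = '_' then cur.reverse :: mtumSplit rest [] else mtumSplit rest (c :: cur)

theorem mtum_go_spec (fuel : Nat) : ∀ (l cur : List Char) (acc : List (List Char)), l.length < fuel →
    PySem.Chars.splitOn.go "_".toList fuel l cur acc = acc.reverse ++ mtumSplit l cur := by
  induction fuel with
  | zero => intro l cur acc h; omega
  | succ n ih =>
    intro l cur acc h
    match l with
    | [] =>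
      rw [PySem.Chars.splitOn.go]
      · simp [mtumSplit]
      · omega
    | c :: rest =>
      rw [PySem.Chars.splitOn.go]
      by_cases hc : c = '_'
      · subst hc
        have hp : "_".toList.isPrefixOf ('_' :: rest) = true := by simp [List.isPrefixOf]
        simp only [hp, if_true]
        have hdrop : List.drop "_".toList.length ('_' :: rest) = rest := rfl
        rw [hdrop, ih rest [] _ (by simpa using Nat.lt_of_succ_lt_succ h)]
        simp [mtumSplit]
      · have hp : "_".toList.isPrefixOf (c :: rest) = false := by
          simp [List.isPrefixOf]; exact fun he => hc he.symm
        simp only [hp, Bool.false_eq_true, if_false]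
        rw [ih rest (c :: cur) acc (by simpa using Nat.lt_of_succ_lt_succ h)]
        simp [mtumSplit, hc]

theorem mtum_splitOn_eq (cs : List Char) :
    PySem.Chars.splitOn cs "_".toList = mtumSplit cs [] := by
  unfold PySem.Chars.splitOn
  rw [mtum_go_spec (cs.length + 1) cs [] [] (by omega)]
  simp

-- mtumSplit never returns the empty list
theorem mtumSplit_ne_nil (l cur : List Char) : mtumSplit l cur ≠ [] := by
  induction l generalizing cur with
  | nil => simp [mtumSplit]
  | cons c rest ih => simp only [mtumSplit]; split_ifs <;> simp [ih]

-- flushing a token is exactly A's per-token mapping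
theorem mtumB_flush_eq (tok : List Char) :
    mtumB_flush tok =
      (if tok != "inv".toList then mtum_capitalize tok ++ " ".toList
       else mtum_capitalize tok ++ ". ".toList) := by
  cases h : tok == "inv".toList <;>
    cases tok <;> simp_all [mtumB_flush, mtum_capitalize, PySem.Chars.lower]

-- B's streaming loop computes A's join-over-split (tok = current token in order)
theorem mtumB_loop_spec (cs : List Char) : ∀ tok : List Char,
    mtumB_loop (cs ++ ['_']) tok =
      PySem.Chars.join [] ((mtumSplit cs tok.reverse).map (fun x =>
        if x != "inv".toList then mtum_capitalize x ++ " ".toList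
        else mtum_capitalize x ++ ". ".toList)) := by
  induction cs with
  | nil =>
    intro tok
    simp [mtumB_loop, mtumSplit, PySem.Chars.join_singleton, mtumB_flush_eq]
  | cons c rest ih =>
    intro tok
    by_cases hc : c = '_'
    · subst hc
      simp only [List.cons_append, mtumB_loop, beq_self_eq_true, if_true, mtumSplit,
        List.reverse_reverse, List.map_cons]
      rw [ih [], List.reverse_nil]
      rcases hm : (mtumSplit rest []).map (fun x =>
          if x != "inv".toList then mtum_capitalize x ++ " ".toList
          else mtum_capitalize x ++ ". ".toList) with _ | ⟨p, ps⟩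
      · exact absurd (List.map_eq_nil_iff.mp hm) (mtumSplit_ne_nil _ _)
      · rw [PySem.Chars.join_cons_cons]
        simp [mtumB_flush_eq]
    · have hb : (c == '_') = false := by simp [hc]
      simp only [List.cons_append, mtumB_loop, hb, Bool.false_eq_true, if_false, mtumSplit, hc]
      rw [ih (tok ++ [c])]
      simp

-- the two fallbacks agree
theorem mtum_fallback_eq (word : String) : mtumB_fallback word = mtum_fallback word := by
  unfold mtumB_fallback mtum_fallback
  rw [mtum_splitOn_eq, mtumB_loop_spec word.toList []]
  simp

-- word[9:] undoes the "baseline_" prefix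
theorem mtum_slice_drop (key : List Char) :
    PySem.Chars.slice ("baseline_".toList ++ key) (some 9) none = key := by
  simp only [PySem.Chars.slice_eq_listSlice]
  rw [PySem.List.slice_from _ (by norm_num)]
  exact List.drop_left' (by rfl)

-- the table misses every key other than its ten literals
theorem mtum_get?_none (key : List Char)
    (h1 : key ≠ "prob_est".toList) (h2 : key ≠ "kl_divergence".toList)
    (h3 : key ≠ "partition_weighted_rmse".toList) (h4 : key ≠ "weighted_rmse".toList)
    (h5 : key ≠ "inv_weighted_rmse".toList) (h6 : key ≠ "partition_inv_weighted_rmse".toList)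
    (h7 : key ≠ "hr_error".toList) (h8 : key ≠ "variance".toList)
    (h9 : key ≠ "hr_count_error_rmse".toList) (h10 : key ≠ "time".toList) :
    PySem.Dict.get? mtum_labels key = none := by
  have e1 := Ne.symm h1; have e2 := Ne.symm h2; have e3 := Ne.symm h3
  have e4 := Ne.symm h4; have e5 := Ne.symm h5; have e6 := Ne.symm h6
  have e7 := Ne.symm h7; have e8 := Ne.symm h8; have e9 := Ne.symm h9
  have e10 := Ne.symm h10
  simp at e1 e2 e3 e4 e5 e6 e7 e8 e9 e10
  have hd : mtum_labels = PySem.Dict.mk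
    [("prob_est".toList, "Frequency Estimation Density"),
     ("kl_divergence".toList, "Relative Entropy"),
     ("partition_weighted_rmse".toList, "Distribution RMSE"),
     ("weighted_rmse".toList, "Distribution RMSE"),
     ("inv_weighted_rmse".toList, "Distribution RMSE"),
     ("partition_inv_weighted_rmse".toList, "Distribution RMSE"),
     ("hr_error".toList, "Distribution RMSE"),
     ("variance".toList, "Emp. Error Variance"),
     ("hr_count_error_rmse".toList, "Count RMSE (Normalized)"),
     ("time".toList, "Duration (seconds)")] := by decide
  rw [hd]
  simp [PySem.Dict.get?, e1, e2, e3, e4, e5, e6, e7, e8, e9, e10]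

theorem mtum_main (word : String) : metric_to_unit_mapping word = metric_to_unit_mapping_alt word := by
  by_cases hb : PySem.Chars.startswith word.toList "baseline_".toList = true
  · -- word = "baseline_" + key
    obtain ⟨key, hw⟩ := (PySem.Chars.startswith_iff _ _).1 hb
    unfold metric_to_unit_mapping metric_to_unit_mapping_alt
    rw [← hw] at hb ⊢
    simp only [hb, if_true, mtum_slice_drop]
    by_cases k1 : key = "prob_est".toList
    · subst k1
      rw [show PySem.Dict.get? mtum_labels "prob_est".toList = some "Frequency Estimation Density" from by decide]
      simp [mtum_compWord]
    by_cases k2 : key = "kl_divergence".toList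
    · subst k2
      rw [show PySem.Dict.get? mtum_labels "kl_divergence".toList = some "Relative Entropy" from by decide]
      simp [mtum_compWord]
    by_cases k3 : key = "partition_weighted_rmse".toList
    · subst k3
      rw [show PySem.Dict.get? mtum_labels "partition_weighted_rmse".toList = some "Distribution RMSE" from by decide]
      simp [mtum_compWord]
    by_cases k4 : key = "weighted_rmse".toList
    · subst k4
      rw [show PySem.Dict.get? mtum_labels "weighted_rmse".toList = some "Distribution RMSE" from by decide]
      simp [mtum_compWord]
    by_cases k5 : key = "inv_weighted_rmse".toList
    · subst k5
      rw [show PySem.Dict.get? mtum_labels "inv_weighted_rmse".toList = some "Distribution RMSE" from by decide]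
      simp [mtum_compWord]
    by_cases k6 : key = "partition_inv_weighted_rmse".toList
    · subst k6
      rw [show PySem.Dict.get? mtum_labels "partition_inv_weighted_rmse".toList = some "Distribution RMSE" from by decide]
      simp [mtum_compWord]
    by_cases k7 : key = "hr_error".toList
    · subst k7
      rw [show PySem.Dict.get? mtum_labels "hr_error".toList = some "Distribution RMSE" from by decide]
      simp [mtum_compWord]
    by_cases k8 : key = "variance".toList
    · subst k8
      rw [show PySem.Dict.get? mtum_labels "variance".toList = some "Emp. Error Variance" from by decide]
      simp [mtum_compWord]
    by_cases k9 : key = "hr_count_error_rmse".toList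
    · subst k9
      rw [show PySem.Dict.get? mtum_labels "hr_count_error_rmse".toList = some "Count RMSE (Normalized)" from by decide]
      simp [mtum_compWord]
    by_cases k10 : key = "time".toList
    · subst k10
      rw [show PySem.Dict.get? mtum_labels "time".toList = some "Duration (seconds)" from by decide]
      simp [mtum_compWord]
    rw [mtum_get?_none key k1 k2 k3 k4 k5 k6 k7 k8 k9 k10]
    have d1 := k1; have d2 := k2; have d3 := k3; have d4 := k4; have d5 := k5
    have d6 := k6; have d7 := k7; have d8 := k8; have d9 := k9; have d10 := k10
    simp at d1 d2 d3 d4 d5 d6 d7 d8 d9 d10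
    simp [mtum_compWord, d1, d2, d3, d4, d5, d6, d7, d8, d9, d10, mtum_fallback_eq]
  · -- word does not start with "baseline_": no baseline_ comparison can fire, key = word
    have hb' : PySem.Chars.startswith word.toList "baseline_".toList = false :=
      Bool.not_eq_true _ ▸ hb
    have hnb : ∀ t : List Char, (word.toList == "baseline_".toList ++ t) = false := by
      intro t
      simp only [beq_eq_false_iff_ne, ne_eq]
      intro he
      have : PySem.Chars.startswith word.toList "baseline_".toList = true :=
        (PySem.Chars.startswith_iff _ _).2 ⟨t, he.symm⟩
      rw [hb'] at this; exact Bool.false_ne_true this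
    unfold metric_to_unit_mapping metric_to_unit_mapping_alt
    simp only [hb', Bool.false_eq_true, if_false]
    by_cases k1 : word.toList = "prob_est".toList
    · rw [k1]
      rw [show PySem.Dict.get? mtum_labels "prob_est".toList = some "Frequency Estimation Density" from by decide]
      simp [mtum_compWord]
    by_cases k2 : word.toList = "kl_divergence".toList
    · rw [k2]
      rw [show PySem.Dict.get? mtum_labels "kl_divergence".toList = some "Relative Entropy" from by decide]
      simp [mtum_compWord]
    by_cases k3 : word.toList = "partition_weighted_rmse".toList
    · rw [k3]
      rw [show PySem.Dict.get? mtum_labels "partition_weighted_rmse".toList = some "Distribution RMSE" from by decide]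
      simp [mtum_compWord]
    by_cases k4 : word.toList = "weighted_rmse".toList
    · rw [k4]
      rw [show PySem.Dict.get? mtum_labels "weighted_rmse".toList = some "Distribution RMSE" from by decide]
      simp [mtum_compWord]
    by_cases k5 : word.toList = "inv_weighted_rmse".toList
    · rw [k5]
      rw [show PySem.Dict.get? mtum_labels "inv_weighted_rmse".toList = some "Distribution RMSE" from by decide]
      simp [mtum_compWord]
    by_cases k6 : word.toList = "partition_inv_weighted_rmse".toList
    · rw [k6]
      rw [show PySem.Dict.get? mtum_labels "partition_inv_weighted_rmse".toList = some "Distribution RMSE" from by decide]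
      simp [mtum_compWord]
    by_cases k7 : word.toList = "hr_error".toList
    · rw [k7]
      rw [show PySem.Dict.get? mtum_labels "hr_error".toList = some "Distribution RMSE" from by decide]
      simp [mtum_compWord]
    by_cases k8 : word.toList = "variance".toList
    · rw [k8]
      rw [show PySem.Dict.get? mtum_labels "variance".toList = some "Emp. Error Variance" from by decide]
      simp [mtum_compWord]
    by_cases k9 : word.toList = "hr_count_error_rmse".toList
    · rw [k9]
      rw [show PySem.Dict.get? mtum_labels "hr_count_error_rmse".toList = some "Count RMSE (Normalized)" from by decide]
      simp [mtum_compWord]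
    by_cases k10 : word.toList = "time".toList
    · rw [k10]
      rw [show PySem.Dict.get? mtum_labels "time".toList = some "Duration (seconds)" from by decide]
      simp [mtum_compWord]
    rw [mtum_get?_none _ k1 k2 k3 k4 k5 k6 k7 k8 k9 k10]
    have d1 := k1; have d2 := k2; have d3 := k3; have d4 := k4; have d5 := k5
    have d6 := k6; have d7 := k7; have d8 := k8; have d9 := k9; have d10 := k10
    simp at d1 d2 d3 d4 d5 d6 d7 d8 d9 d10
    have n1 := hnb "prob_est".toList
    have n2 := hnb "kl_divergence".toList
    have n3 := hnb "partition_weighted_rmse".toList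
    have n4 := hnb "weighted_rmse".toList
    have n5 := hnb "inv_weighted_rmse".toList
    have n6 := hnb "partition_inv_weighted_rmse".toList
    have n7 := hnb "variance".toList
    have n8 := hnb "hr_error".toList
    have n9 := hnb "hr_count_error_rmse".toList
    have n10 := hnb "time".toList
    simp at n1 n2 n3 n4 n5 n6 n7 n8 n9 n10
    simp [mtum_compWord, d1, d2, d3, d4, d5, d6, d7, d8, d9, d10, n1, n2, n3, n4, n5, n6, n7, n8, n9, n10, mtum_fallback_eq]

-- ===== VERDICT (by name: the statement is the Claim_ definition above) =====
theorem metric_to_unit_mapping_spec : Claim_equal_metric_to_unit_mapping := by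
  intro word _
  exact mtum_main word
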